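-- pv_equiv track=rewrite | github.com/EHwooKim/Algorithms | Test/2020_Line/problem02.py | solution
-- ===== SOURCE A (Python) =====
-- def solution(answer_sheet, sheets):
--     n = len(sheets)
--     max_jisoo = 0
--     for i in range(n):
--         for j in range(i + 1, n):
--             first, second = sheets[i], sheets[j]
--             count = 0
--             tmp = 0
--             max_tmp = 0
--             for k in range(len(answer_sheet)):
--                 if first[k] == second[k]:
--                     if answer_sheet[k] != first[k]:
--                         count += 1
--                         tmp += 1
--                         max_tmp = max(tmp, max_tmp)
--                     else:
--                         tmp = 0
--                 elif first[k] != second[k]: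
--                     tmp = 0
--
--             jisoo = count + max_tmp ** 2
--             max_jisoo = max(jisoo, max_jisoo)
--
--     return max_jisoo
-- ===== SOURCE B (Python) =====
-- def max_run(bad):
--     """Longest run of True: recurse on the first False, comparing the prefix run
--     with the best run of the remainder."""
--     if not bad:
--         return 0
--     if False in bad:
--         i = bad.index(False)
--         return max(i, max_run(bad[i + 1:]))
--     return len(bad)
--
--
-- def solution(answer_sheet, sheets):
--     best = 0
--     for i, first in enumerate(sheets):
--         for second in sheets[i + 1:]:
--             bad = [f == s != a for a, f, s in zip(answer_sheet, first, second)]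
--             run = max_run(bad)
--             best = max(best, sum(bad) + run * run)
--     return best
-- ===== Notes on version B (the rewrite author's own statement) =====
-- stated objective: simpler
-- what changed: A's stateful count/tmp/max_tmp index scan per pair is replaced by building a boolean agreement-error mask per pair (zip comprehension), scoring it as sum(mask) plus the square of the longest True run, the run found by recursing on the position of the first False.
import Mathlib
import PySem

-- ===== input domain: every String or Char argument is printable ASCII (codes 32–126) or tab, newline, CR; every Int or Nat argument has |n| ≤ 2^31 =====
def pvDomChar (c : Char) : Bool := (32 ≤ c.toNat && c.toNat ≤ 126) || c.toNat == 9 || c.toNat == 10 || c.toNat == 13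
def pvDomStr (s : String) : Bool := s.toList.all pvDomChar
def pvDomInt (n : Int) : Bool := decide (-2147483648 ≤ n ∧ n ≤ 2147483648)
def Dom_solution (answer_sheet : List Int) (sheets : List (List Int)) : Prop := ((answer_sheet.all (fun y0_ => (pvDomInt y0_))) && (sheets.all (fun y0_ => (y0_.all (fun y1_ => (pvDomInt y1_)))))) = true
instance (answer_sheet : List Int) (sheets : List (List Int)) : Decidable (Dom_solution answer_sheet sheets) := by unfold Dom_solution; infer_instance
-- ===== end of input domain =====

-- B replaces A's stateful count/tmp/max_tmp scan by a boolean mask per pair: score = sum(mask) + (longest True run)²,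
-- the longest run found by recursing on the position of the first False (objective: simpler decomposition, not faster).

-- ===== PORT A =====
-- inner k-loop of A: state (count, tmp, max_tmp)
def innerA (answer_sheet first second : List Int) : Int :=
  let st := (PySem.List.pyRange 0 (answer_sheet.length : Int) 1).foldl
    (fun (st : Int × Int × Int) k =>
      if PySem.List.pyGetD first k 0 = PySem.List.pyGetD second k 0 then
        if PySem.List.pyGetD answer_sheet k 0 ≠ PySem.List.pyGetD first k 0 then
          (st.1 + 1, st.2.1 + 1, max (st.2.1 + 1) st.2.2)
        else (st.1, 0, st.2.2)
      else (st.1, 0, st.2.2))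
    (0, 0, 0)
  st.1 + st.2.2 ^ 2

def solution (answer_sheet : List Int) (sheets : List (List Int)) : Int :=
  let n : Int := (sheets.length : Int)
  (PySem.List.pyRange 0 n 1).foldl (fun max_jisoo i =>
    (PySem.List.pyRange (i + 1) n 1).foldl (fun mj j =>
      max (innerA answer_sheet (PySem.List.pyGetD sheets i []) (PySem.List.pyGetD sheets j [])) mj)
      max_jisoo) 0

-- ===== PORT B =====
-- longest run of True: recurse on the first False. The Lean port threads a fuel argument
-- (bad.length is always enough, each call drops at least one element) so the recursion is structural.
def maxRunB (fuel : Nat) (bad : List Bool) : Int :=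
  match fuel with
  | 0 => 0
  | fuel + 1 =>
    if bad.isEmpty then 0
    else
      match PySem.List.index? bad false with
      | some i => max (i : Int) (maxRunB fuel (PySem.List.slice bad (some ((i : Int) + 1)) none))
      | none => (bad.length : Int)

def badMask (answer_sheet first second : List Int) : List Bool :=
  (answer_sheet.zip (first.zip second)).map (fun z => decide (z.2.1 = z.2.2 ∧ z.2.2 ≠ z.1))

def pairScoreB (answer_sheet first second : List Int) : Int :=
  let bad := badMask answer_sheet first second
  let run := maxRunB bad.length bad
  (bad.map (fun b => if b then (1 : Int) else 0)).sum + run * run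

def solution_alt (answer_sheet : List Int) (sheets : List (List Int)) : Int :=
  (PySem.List.enumerate sheets 0).foldl (fun best p =>
    (PySem.List.slice sheets (some (p.1 + 1)) none).foldl (fun best second =>
      max best (pairScoreB answer_sheet p.2 second)) best) 0

-- ===== PRECONDITION & SPEC =====
-- Pre_ excludes exactly the inputs where A raises IndexError: at least two sheets and some sheet shorter than answer_sheet.
def Pre_solution (answer_sheet : List Int) (sheets : List (List Int)) : Prop :=
  2 ≤ sheets.length → ∀ s ∈ sheets, answer_sheet.length ≤ s.length
instance (answer_sheet : List Int) (sheets : List (List Int)) : Decidable (Pre_solution answer_sheet sheets) := by unfold Pre_solution; infer_instance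

def pvWitness_solution : List Int × List (List Int) := ([1, 2], [[1, 1], [1, 1], [2, 2]])

def Spec_solution (answer_sheet : List Int) (sheets : List (List Int)) (out : Int) : Prop := out = solution_alt answer_sheet sheets
instance (answer_sheet : List Int) (sheets : List (List Int)) (out : Int) : Decidable (Spec_solution answer_sheet sheets out) := by unfold Spec_solution; infer_instance

-- ===== CLAIM (what is proved, stated in full; the proofs are below) =====
def Claim_equal_solution : Prop := ∀ (answer_sheet : List Int) (sheets : List (List Int)), Dom_solution answer_sheet sheets → Pre_solution answer_sheet sheets → Spec_solution answer_sheet sheets (solution answer_sheet sheets)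

-- ===== LEMMAS AND PROOFS =====

-- A's scan step, on the boolean mask
def stepA (st : Int × Int × Int) (b : Bool) : Int × Int × Int :=
  if b then (st.1 + 1, st.2.1 + 1, max (st.2.1 + 1) st.2.2) else (st.1, 0, st.2.2)

-- trailing-run / best-run accumulators
def trAux (t : Int) : List Bool → Int
  | [] => t
  | true :: bs => trAux (t + 1) bs
  | false :: bs => trAux 0 bs

def mrAux (t : Int) : List Bool → Int
  | [] => t
  | true :: bs => mrAux (t + 1) bs
  | false :: bs => max t (mrAux 0 bs)

def cntI (bad : List Bool) : Int := (bad.map (fun b => if b then (1 : Int) else 0)).sum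

lemma mrAux_ge (bs : List Bool) : ∀ t, t ≤ mrAux t bs := by
  induction bs with
  | nil => intro t; simp [mrAux]
  | cons b bs ih =>
    intro t
    cases b with
    | true => exact le_trans (by omega) (ih (t + 1))
    | false => simp only [mrAux]; exact le_max_left _ _

lemma scan_spec (bad : List Bool) : ∀ c t m : Int, 0 ≤ t → t ≤ m →
    bad.foldl stepA (c, t, m) = (c + cntI bad, trAux t bad, max m (mrAux t bad)) := by
  induction bad with
  | nil =>
    intro c t m _ htm
    simp [cntI, trAux, mrAux, max_eq_left htm]
  | cons b bs ih =>
    intro c t m ht htm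
    cases b with
    | true =>
      have h1 : (0 : Int) ≤ t + 1 := by omega
      have h2 : t + 1 ≤ max (t + 1) m := le_max_left _ _
      have := ih (c + 1) (t + 1) (max (t + 1) m) h1 h2
      have hst : stepA (c, t, m) true = (c + 1, t + 1, max (t + 1) m) := rfl
      rw [List.foldl_cons, hst, this]
      have hX : t + 1 ≤ mrAux (t + 1) bs := mrAux_ge bs (t + 1)
      have : max (max (t + 1) m) (mrAux (t + 1) bs) = max m (mrAux (t + 1) bs) := by
        rw [max_comm (t + 1) m, max_assoc, max_eq_right hX]
      rw [this]
      simp only [cntI, trAux, mrAux, List.map_cons, List.sum_cons, Prod.mk.injEq, if_pos]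
      exact ⟨by omega, trivial⟩
    | false =>
      have := ih c 0 m le_rfl (by omega)
      have hst : stepA (c, t, m) false = (c, 0, m) := rfl
      rw [List.foldl_cons, hst, this]
      have : max m (max t (mrAux 0 bs)) = max m (mrAux 0 bs) := by
        rw [max_comm t (mrAux 0 bs), ← max_assoc, max_comm m (mrAux 0 bs), max_assoc,
            max_eq_left htm]
      simp [cntI, trAux, mrAux, this]

lemma mrAux_all_true (bs : List Bool) : ∀ t, (∀ b ∈ bs, b = true) → mrAux t bs = t + bs.length := by
  induction bs with
  | nil => intro t _; simp [mrAux]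
  | cons b bs ih =>
    intro t h
    have hb : b = true := h b (by simp)
    subst hb
    rw [mrAux, ih (t + 1) (fun b hb => h b (by simp [hb]))]
    simp only [List.length_cons]; push_cast; omega

lemma mrAux_split (pre : List Bool) : ∀ t suf, (∀ b ∈ pre, b = true) →
    mrAux t (pre ++ false :: suf) = max (t + pre.length) (mrAux 0 suf) := by
  induction pre with
  | nil => intro t suf _; simp [mrAux]
  | cons b pre ih =>
    intro t suf h
    have hb : b = true := h b (by simp)
    subst hb
    rw [List.cons_append, mrAux, ih (t + 1) suf (fun b hb => h b (by simp [hb]))]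
    congr 1
    simp only [List.length_cons]; push_cast; omega

lemma maxRunB_eq (fuel : Nat) : ∀ bad : List Bool, bad.length ≤ fuel → maxRunB fuel bad = mrAux 0 bad := by
  induction fuel with
  | zero =>
    intro bad hl
    have : bad = [] := List.length_eq_zero_iff.mp (by omega)
    subst this; rfl
  | succ fuel ih =>
    intro bad hl
    rw [maxRunB]
    by_cases he : bad.isEmpty
    · rw [if_pos he]
      rw [List.isEmpty_iff] at he
      subst he; simp [mrAux]
    · rw [if_neg he]
      cases h : PySem.List.index? bad false with
      | some i =>
        show max (i : Int) (maxRunB fuel (PySem.List.slice bad (some ((i : Int) + 1)) none)) = mrAux 0 bad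
        obtain ⟨pre, suf, hb, hlen, hnm⟩ := (PySem.List.index?_eq_some_iff _ _ _).mp h
        have hpre : ∀ b ∈ pre, b = true := by
          intro b hbm
          cases b
          · exact absurd hbm hnm
          · rfl
        have hslice : PySem.List.slice bad (some ((i : Int) + 1)) none = suf := by
          have h1 : ((i : Int) + 1) = ((i + 1 : Nat) : Int) := by push_cast; ring
          rw [h1, PySem.List.slice_from_natCast, hb, ← hlen]
          rw [show pre.length + 1 = (pre ++ [false]).length by simp]
          rw [show pre ++ false :: suf = (pre ++ [false]) ++ suf by simp]
          exact List.drop_left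
        rw [hslice]
        have hsufle : suf.length ≤ fuel := by
          subst hb; simp at hl; omega
        rw [ih suf hsufle]
        rw [hb, mrAux_split pre 0 suf hpre, hlen]
        simp
      | none =>
        show ((bad.length : Nat) : Int) = mrAux 0 bad
        have hall : ∀ b ∈ bad, b = true := by
          intro b hbm
          have := (PySem.List.index?_eq_none_iff _ _).mp h
          cases b
          · exact absurd hbm this
          · rfl
        rw [mrAux_all_true bad 0 hall]; omega

lemma step_val (acc : Int × Int × Int) (a f s : Int) :
    (if f = s then
      if a ≠ f then (acc.1 + 1, acc.2.1 + 1, max (acc.2.1 + 1) acc.2.2)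
      else (acc.1, 0, acc.2.2)
     else (acc.1, 0, acc.2.2)) = stepA acc (decide (f = s ∧ s ≠ a)) := by
  by_cases h1 : f = s <;> by_cases h2 : a = f <;> subst_eqs <;> simp_all [stepA]
  omega

lemma pyGetD_mem (sheets : List (List Int)) (i : Int) (h0 : 0 ≤ i) (h1 : i < (sheets.length : Int)) :
    PySem.List.pyGetD sheets i [] ∈ sheets := by
  have h2 : i.toNat < sheets.length := by omega
  rw [PySem.List.pyGetD_eq_getElem sheets [] h0 h1]
  exact List.getElem_mem h2

lemma pair_eq (answer_sheet first second : List Int)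
    (hf : answer_sheet.length ≤ first.length) (hs : answer_sheet.length ≤ second.length) :
    innerA answer_sheet first second = pairScoreB answer_sheet first second := by
  have hzlen : (answer_sheet.zip (first.zip second)).length = answer_sheet.length := by
    simp; omega
  have hmask : badMask answer_sheet first second
      = (answer_sheet.zip (first.zip second)).map (fun z => decide (z.2.1 = z.2.2 ∧ z.2.2 ≠ z.1)) := rfl
  have hcongr : ∀ (acc : Int × Int × Int), ∀ k ∈ PySem.List.pyRange 0 ((answer_sheet.zip (first.zip second)).length : Int),
      (if PySem.List.pyGetD first k 0 = PySem.List.pyGetD second k 0 then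
        if PySem.List.pyGetD answer_sheet k 0 ≠ PySem.List.pyGetD first k 0 then
          (acc.1 + 1, acc.2.1 + 1, max (acc.2.1 + 1) acc.2.2)
        else (acc.1, 0, acc.2.2)
       else (acc.1, 0, acc.2.2))
      = stepA acc ((fun z => decide (z.2.1 = z.2.2 ∧ z.2.2 ≠ z.1))
          (PySem.List.pyGetD (answer_sheet.zip (first.zip second)) k ((0 : Int), (0 : Int), (0 : Int)))) := by
    intro acc k hk
    obtain ⟨hk0, hk1⟩ := PySem.List.mem_pyRange_one.mp hk
    have hkn : k.toNat < (answer_sheet.zip (first.zip second)).length := by omega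
    rw [PySem.List.pyGetD_eq_getElem _ _ hk0 hk1]
    rw [PySem.List.pyGetD_eq_getElem answer_sheet 0 hk0 (by rw [hzlen] at hk1; exact hk1)]
    rw [PySem.List.pyGetD_eq_getElem first 0 hk0 (by rw [hzlen] at hk1; omega)]
    rw [PySem.List.pyGetD_eq_getElem second 0 hk0 (by rw [hzlen] at hk1; omega)]
    simp only [List.getElem_zip]
    exact step_val acc _ _ _
  simp only [innerA, pairScoreB]
  rw [show ((answer_sheet.length : Int)) = ((answer_sheet.zip (first.zip second)).length : Int) by rw [hzlen]]
  rw [PySem.List.foldl_congr_mem _ _ _ _ hcongr]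
  rw [PySem.List.foldl_pyRange_zero_pyGetD' (answer_sheet.zip (first.zip second)) ((0 : Int), (0 : Int), (0 : Int))
      (fun acc z => stepA acc (decide (z.2.1 = z.2.2 ∧ z.2.2 ≠ z.1))) ((0 : Int), (0 : Int), (0 : Int))]
  rw [← List.foldl_map]
  rw [← hmask]
  rw [scan_spec (badMask answer_sheet first second) 0 0 0 le_rfl le_rfl]
  rw [maxRunB_eq (badMask answer_sheet first second).length (badMask answer_sheet first second) le_rfl]
  have h0m : max (0 : Int) (mrAux 0 (badMask answer_sheet first second)) = mrAux 0 (badMask answer_sheet first second) :=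
    max_eq_right (mrAux_ge _ 0)
  simp only [h0m, cntI]
  ring

-- ===== VERDICT (by name: the statement is the Claim_ definition above) =====
theorem solution_spec : Claim_equal_solution := by
  intro answer_sheet sheets _ hpre
  unfold Spec_solution
  simp only [solution, solution_alt]
  rw [PySem.List.enumerate_eq_map_pyRange sheets [], List.foldl_map]
  simp only [PySem.List.len_eq]
  apply PySem.List.foldl_congr_mem
  intro acc i hi
  obtain ⟨h0, h1⟩ := PySem.List.mem_pyRange_one.mp hi
  rw [PySem.List.slice_from sheets (by omega : (0 : Int) ≤ i + 1)]
  rw [PySem.List.foldl_pyRange_pyGetD' sheets []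
      (fun mj second => max (innerA answer_sheet (PySem.List.pyGetD sheets i []) second) mj) acc
      (by omega : (0 : Int) ≤ i + 1)]
  apply PySem.List.foldl_congr_mem
  intro acc2 second hsec
  have hn2 : 2 ≤ sheets.length := by
    have hlt : (i + 1).toNat < sheets.length := by
      by_contra hge
      rw [List.drop_eq_nil_of_le (by omega)] at hsec
      exact absurd hsec (List.not_mem_nil)
    omega
  have hlens := hpre hn2
  have hfm : PySem.List.pyGetD sheets i [] ∈ sheets := pyGetD_mem sheets i h0 h1
  have hsm : second ∈ sheets := List.mem_of_mem_drop hsec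
  rw [pair_eq answer_sheet _ _ (hlens _ hfm) (hlens _ hsm), max_comm]
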